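-- pv_equiv track=rewrite | github.com/snipsco/snips-nlu | snips_nlu/slot_filler/features_utils.py | char_range_to_token_range
-- ===== SOURCE A (Python) =====
-- def char_range_to_token_range(char_range, tokens_as_string):
--     start, end = char_range
--     # TODO: if possible avoid looping on the tokens for better efficiency
--     current_length = 0
--     token_start = None
--     for i, t in enumerate(tokens_as_string):
--         if current_length == start:
--             token_start = i
--             break
--         current_length += len(t) + 1
--     if token_start is None:
--         return
--
--     token_end = None
--     current_length -= 1  # Remove the last space
--     for i, t in enumerate(tokens_as_string[token_start:]):
--         current_length += len(t) + 1
--         if current_length == end: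
--             token_end = token_start + i + 1
--             break
--     if token_end is None:
--         return
--     return token_start, token_end
-- ===== SOURCE B (Python) =====
-- def char_range_to_token_range(char_range, tokens_as_string):
--     start, end = char_range
--     starts = {}
--     ends = {}
--     pos = 0
--     for i, t in enumerate(tokens_as_string):
--         starts[pos] = i
--         ends[pos + len(t)] = i + 1
--         pos += len(t) + 1
--     token_start = starts.get(start)
--     token_end = ends.get(end)
--     if token_start is None or token_end is None or token_end <= token_start:
--         return None
--     return token_start, token_end
-- ===== Notes on version B (the rewrite author's own statement) =====
-- stated objective: simpler
-- what changed: Replaces the two sequential accumulating scans (the second restarting from token_start over a slice) by one pass that indexes every token's start and end char offset in two dicts, followed by constant-time lookups with a token_end > token_start guard.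
import Mathlib
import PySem

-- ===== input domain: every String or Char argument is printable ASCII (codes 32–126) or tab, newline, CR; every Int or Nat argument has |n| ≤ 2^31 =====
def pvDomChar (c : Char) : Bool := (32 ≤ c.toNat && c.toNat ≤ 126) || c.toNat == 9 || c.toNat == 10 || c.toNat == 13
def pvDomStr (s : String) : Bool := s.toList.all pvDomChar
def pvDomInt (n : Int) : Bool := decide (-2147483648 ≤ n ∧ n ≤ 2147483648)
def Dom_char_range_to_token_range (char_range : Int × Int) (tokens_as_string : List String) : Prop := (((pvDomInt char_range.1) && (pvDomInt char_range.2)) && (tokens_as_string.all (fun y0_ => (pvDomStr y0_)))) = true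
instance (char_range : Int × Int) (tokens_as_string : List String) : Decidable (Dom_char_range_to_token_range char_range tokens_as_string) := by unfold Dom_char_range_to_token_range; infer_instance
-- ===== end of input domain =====

-- B changes the algorithm: one indexing pass building offset→token dicts plus two lookups,
-- instead of A's two sequential accumulating scans; objective: simpler.

-- ===== PORT A =====
-- first loop of A: token_start = first i with current_length == start (break), else None
def crA_findStart (start : Int) : List String → Int → Int → Option Int
  | [], _, _ => none
  | t :: ts, i, cur =>
      if cur = start then some i
      else crA_findStart start ts (i + 1) (cur + PySem.Str.len t + 1)

-- second loop of A over tokens_as_string[token_start:]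
def crA_findEnd (endc tstart : Int) : List String → Int → Int → Option Int
  | [], _, _ => none
  | t :: ts, i, cur =>
      let cur' := cur + PySem.Str.len t + 1
      if cur' = endc then some (tstart + i + 1)
      else crA_findEnd endc tstart ts (i + 1) cur'

def char_range_to_token_range (char_range : Int × Int) (tokens_as_string : List String) : Option (Int × Int) :=
  let start := char_range.1
  let endc := char_range.2
  match crA_findStart start tokens_as_string 0 0 with
  | none => none
  | some token_start =>
      -- at break, current_length == start; then current_length -= 1
      match crA_findEnd endc token_start (PySem.List.slice tokens_as_string (some token_start) none) 0 (start - 1) with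
      | none => none
      | some token_end => some (token_start, token_end)

-- ===== PORT B =====
-- the single indexing pass of B: starts[pos] = i, ends[pos + len(t)] = i + 1
def crB_build : List String → Int → Int → PySem.Dict Int Int → PySem.Dict Int Int → PySem.Dict Int Int × PySem.Dict Int Int
  | [], _, _, s, e => (s, e)
  | t :: ts, i, pos, s, e =>
      crB_build ts (i + 1) (pos + PySem.Str.len t + 1)
        (s.insert pos i) (e.insert (pos + PySem.Str.len t) (i + 1))

def char_range_to_token_range_alt (char_range : Int × Int) (tokens_as_string : List String) : Option (Int × Int) :=
  let d := crB_build tokens_as_string 0 0 PySem.Dict.empty PySem.Dict.empty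
  match d.1.get? char_range.1, d.2.get? char_range.2 with
  | some token_start, some token_end =>
      if token_end ≤ token_start then none else some (token_start, token_end)
  | _, _ => none

-- ===== PRECONDITION & SPEC =====
def Spec_char_range_to_token_range (char_range : Int × Int) (tokens_as_string : List String) (out : Option (Int × Int)) : Prop := out = char_range_to_token_range_alt char_range tokens_as_string
instance (char_range : Int × Int) (tokens_as_string : List String) (out : Option (Int × Int)) : Decidable (Spec_char_range_to_token_range char_range tokens_as_string out) := by unfold Spec_char_range_to_token_range; infer_instance

-- ===== CLAIM (what is proved, stated in full; the proofs are below) =====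
def Claim_equal_char_range_to_token_range : Prop := ∀ (char_range : Int × Int) (tokens_as_string : List String), Dom_char_range_to_token_range char_range tokens_as_string → Spec_char_range_to_token_range char_range tokens_as_string (char_range_to_token_range char_range tokens_as_string)

-- ===== LEMMAS AND PROOFS =====

-- direct scan for the first token whose END offset is k (absolute index i, start offset pos)
def crE (k : Int) : List String → Int → Int → Option Int
  | [], _, _ => none
  | t :: ts, i, pos =>
      if pos + PySem.Str.len t = k then some (i + 1)
      else crE k ts (i + 1) (pos + PySem.Str.len t + 1)

-- total char width of a token list, counting one separating space per token
def crW : List String → Int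
  | [] => 0
  | t :: ts => PySem.Str.len t + 1 + crW ts

theorem crLen_nonneg (t : String) : 0 ≤ PySem.Str.len t := by
  simp [PySem.Str.len_eq]

theorem crW_nonneg (ts : List String) : 0 ≤ crW ts := by
  induction ts with
  | nil => simp [crW]
  | cons t ts ih => have := crLen_nonneg t; simp [crW]; omega

theorem crB_starts_get (ts : List String) (k : Int) :
    ∀ (i pos : Int) (s e : PySem.Dict Int Int),
      (∀ j ∈ s.keys, j < pos) →
      (crB_build ts i pos s e).1.get? k = (s.get? k).or (crA_findStart k ts i pos) := by
  induction ts with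
  | nil => intro i pos s e _; simp [crB_build, crA_findStart]
  | cons t ts ih =>
      intro i pos s e hs
      have hlen := crLen_nonneg t
      rw [crB_build, ih _ _ _ _ (by
        intro j hj
        rcases (PySem.Dict.mem_keys_insert s pos j i).mp hj with h | h
        · omega
        · have := hs j h; omega)]
      rw [PySem.Dict.get?_insert]
      by_cases hk : k = pos
      · subst hk
        have hnone : s.get? k = none := by
          rw [PySem.Dict.get?_eq_none_iff_not_mem_keys]
          intro hmem; exact absurd (hs k hmem) (by omega)
        simp [crA_findStart, hnone]
      · rw [if_neg hk, crA_findStart, if_neg (show ¬ pos = k from fun h => hk h.symm)]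

theorem crB_ends_get (ts : List String) (k : Int) :
    ∀ (i pos : Int) (s e : PySem.Dict Int Int),
      (∀ j ∈ e.keys, j < pos) →
      (crB_build ts i pos s e).2.get? k = (e.get? k).or (crE k ts i pos) := by
  induction ts with
  | nil => intro i pos s e _; simp [crB_build, crE]
  | cons t ts ih =>
      intro i pos s e he
      have hlen := crLen_nonneg t
      rw [crB_build, ih _ _ _ _ (by
        intro j hj
        rcases (PySem.Dict.mem_keys_insert e (pos + PySem.Str.len t) j (i+1)).mp hj with h | h
        · omega
        · have := he j h; omega)]
      rw [PySem.Dict.get?_insert]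
      by_cases hk : k = pos + PySem.Str.len t
      · have hnone : e.get? k = none := by
          rw [PySem.Dict.get?_eq_none_iff_not_mem_keys]
          intro hmem; have := he k hmem; omega
        rw [if_pos hk, hnone, Option.some_or, Option.none_or, crE, if_pos hk.symm]
      · rw [if_neg hk, crE, if_neg (show ¬ pos + PySem.Str.len t = k from fun h => hk h.symm)]

-- A's second loop equals the direct end-scan shifted to absolute indices
theorem crA_findEnd_eq_crE (k j : Int) (ts : List String) :
    ∀ (i pos : Int), crA_findEnd k j ts i (pos - 1) = crE k ts (j + i) pos := by
  induction ts with
  | nil => intro i pos; simp [crA_findEnd, crE]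
  | cons t ts ih =>
      intro i pos
      simp only [crA_findEnd, crE, PySem.Str.len_eq]
      have h1 : pos - 1 + (t.toList.length : Int) + 1 = pos + (t.toList.length : Int) := by ring
      rw [h1]
      by_cases hk : pos + (t.toList.length : Int) = k
      · rw [if_pos hk, if_pos hk]
      · rw [if_neg hk, if_neg hk]
        have h5 := ih (i + 1) (pos + (t.toList.length : Int) + 1)
        rw [show pos + (t.toList.length : Int) + 1 - 1 = pos + (t.toList.length : Int) from by ring,
            show j + (i + 1) = j + i + 1 from by ring] at h5
        exact h5

theorem crE_append (k : Int) (as bs : List String) :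
    ∀ (i pos : Int),
      crE k (as ++ bs) i pos = (crE k as i pos).or (crE k bs (i + as.length) (pos + crW as)) := by
  induction as with
  | nil => intro i pos; simp [crE, crW]
  | cons t ts ih =>
      intro i pos
      simp only [List.cons_append, crE, PySem.Str.len_eq]
      by_cases hk : pos + (t.toList.length : Int) = k
      · rw [if_pos hk, if_pos hk, Option.some_or]
      · rw [if_neg hk, if_neg hk, ih (i + 1) (pos + (t.toList.length : Int) + 1)]
        have h3 : i + 1 + ((ts.length : Int)) = i + (((t :: ts).length : Int)) := by
          push_cast [List.length_cons]; ring
        have h4 : pos + (t.toList.length : Int) + 1 + crW ts = pos + crW (t :: ts) := by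
          simp [crW, PySem.Str.len_eq]; ring
        rw [h3, h4]

theorem crE_none_of_lt (k : Int) (ts : List String) :
    ∀ (i pos : Int), k < pos → crE k ts i pos = none := by
  induction ts with
  | nil => intro i pos _; simp [crE]
  | cons t ts ih =>
      intro i pos h
      have hlen := crLen_nonneg t
      rw [crE, if_neg (by omega)]
      exact ih _ _ (by omega)

theorem crE_some_bounds (k : Int) (ts : List String) :
    ∀ (i pos te : Int), crE k ts i pos = some te →
      i < te ∧ te ≤ i + ts.length ∧ k < pos + crW ts := by
  induction ts with
  | nil => intro i pos te h; simp [crE] at h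
  | cons t ts ih =>
      intro i pos te h
      have hlen := crLen_nonneg t
      have hW := crW_nonneg ts
      have hcw : crW (t :: ts) = (t.toList.length : Int) + 1 + crW ts := by
        simp [crW, PySem.Str.len_eq]
      simp only [PySem.Str.len_eq] at hlen
      simp only [crE, PySem.Str.len_eq] at h
      simp only [List.length_cons, hcw]
      by_cases hk : pos + (t.toList.length : Int) = k
      · rw [if_pos hk] at h
        injection h with h; subst h
        refine ⟨by omega, by push_cast; omega, by omega⟩
      · rw [if_neg hk] at h
        obtain ⟨h1, h2, h3⟩ := ih _ _ _ h
        refine ⟨by omega, by push_cast at h2 ⊢; omega, by omega⟩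

theorem crA_findStart_spec (k : Int) (ts : List String) :
    ∀ (i pos j : Int), crA_findStart k ts i pos = some j →
      ∃ m : ℕ, m < ts.length ∧ j = i + m ∧ k = pos + crW (ts.take m) := by
  induction ts with
  | nil => intro i pos j h; simp [crA_findStart] at h
  | cons t ts ih =>
      intro i pos j h
      rw [crA_findStart] at h
      by_cases hk : pos = k
      · rw [if_pos hk] at h
        injection h with h; subst h
        exact ⟨0, by simp, by simp, by simp [crW, hk]⟩
      · rw [if_neg hk] at h
        obtain ⟨m, hm, hj, hk'⟩ := ih _ _ _ h
        exact ⟨m + 1, by simpa using hm, by push_cast; omega, by simp [crW, hk']; ring⟩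

-- ===== VERDICT (by name: the statement is the Claim_ definition above) =====
theorem char_range_to_token_range_spec : Claim_equal_char_range_to_token_range := by
  intro cr tokens _dom
  unfold Spec_char_range_to_token_range
  simp only [char_range_to_token_range, char_range_to_token_range_alt]
  rw [crB_starts_get tokens cr.1 0 0 _ _ (by simp [PySem.Dict.keys_empty]),
      crB_ends_get tokens cr.2 0 0 _ _ (by simp [PySem.Dict.keys_empty])]
  simp only [PySem.Dict.get?_empty, Option.none_or]
  cases hF : crA_findStart cr.1 tokens 0 0 with
  | none => rfl
  | some j =>
      obtain ⟨m, hm, hj, hk⟩ := crA_findStart_spec cr.1 tokens 0 0 j hF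
      simp only [zero_add] at hj hk
      have hj0 : 0 ≤ j := by omega
      have hslice : PySem.List.slice tokens (some j) none = tokens.drop m := by
        rw [PySem.List.slice_from _ hj0]
        congr 1
        omega
      have hAE : crA_findEnd cr.2 j (PySem.List.slice tokens (some j) none) 0 (cr.1 - 1) = crE cr.2 (tokens.drop m) j cr.1 := by
        rw [hslice]
        have h := crA_findEnd_eq_crE cr.2 j (tokens.drop m) 0 cr.1
        simpa using h
      have hsplit := crE_append cr.2 (tokens.take m) (tokens.drop m) 0 0
      rw [List.take_append_drop] at hsplit
      have hidx : (0 : Int) + ((tokens.take m).length : Int) = j := by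
        simp [List.length_take]
        omega
      have hpos : (0 : Int) + crW (tokens.take m) = cr.1 := by omega
      rw [hidx, hpos] at hsplit
      cases hpre : crE cr.2 (tokens.take m) 0 0 with
      | none =>
          have hfull : crE cr.2 tokens 0 0 = crE cr.2 (tokens.drop m) j cr.1 := by
            rw [hsplit, hpre, Option.none_or]
          cases hG : crE cr.2 (tokens.drop m) j cr.1 with
          | none => simp [hAE, hfull, hG]
          | some te =>
              obtain ⟨h1, _, _⟩ := crE_some_bounds cr.2 (tokens.drop m) j cr.1 te hG
              simp [hAE, hfull, hG, not_le.mpr h1]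
      | some te0 =>
          obtain ⟨h1, h2, h3⟩ := crE_some_bounds cr.2 (tokens.take m) 0 0 te0 hpre
          have hte0 : te0 ≤ j := by
            have : ((tokens.take m).length : Int) ≤ (m : Int) := by
              simp [List.length_take]
            omega
          have hlt : cr.2 < cr.1 := by omega
          have hG : crE cr.2 (tokens.drop m) j cr.1 = none :=
            crE_none_of_lt cr.2 (tokens.drop m) j cr.1 hlt
          have hfull : crE cr.2 tokens 0 0 = some te0 := by
            rw [hsplit, hpre, Option.some_or]
          simp [hAE, hfull, hG, hte0]
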